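-- pv_equiv track=rewrite | github.com/oduwsdl/wdill | timelapse.py | extractYearFromUrl
-- ===== SOURCE A (Python) =====
-- def extractYearFromUrl(url):
-- 	if(len(url) > 0):
--
-- 		#http://www.webarchive.org.uk:80/wayback/archive/20090101092312/http://www.google.com/
-- 		#signature: ://
-- 		lasIndexOfSignatureMarker = url.rfind("://")
--
-- 		if( lasIndexOfSignatureMarker > -1 ):
-- 			url = url[:lasIndexOfSignatureMarker]
-- 			lasIndexOfSignatureMarker = url.rfind("/")
--
-- 		lasIndexOfSignatureMarker = lasIndexOfSignatureMarker - 1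
-- 		yearExtract = ''
--
-- 		for i in range(lasIndexOfSignatureMarker, -1, -1):
-- 			#consider review of this block
-- 			try:
-- 				value = int(url[i])
-- 				yearExtract = url[i] + yearExtract
-- 			except ValueError:
-- 				break
--
-- 		yearExtract = yearExtract[0:4]
-- 		return yearExtract
-- ===== SOURCE B (Python) =====
-- def extractYearFromUrl(url):
--     # Path-segment approach: isolate the part before the last '/' of the
--     # pre-'://' prefix, then take its trailing digit run (first 4 digits of it).
--     if not url:
--         return None
--     i = url.rfind('://')
--     if i < 0:
--         return ''
--     s = url[:i]
--     if '/' not in s: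
--         return ''
--     before = s.rsplit('/', 1)[0]
--     run = before[len(before.rstrip('0123456789')):]
--     return run[:4]
-- ===== Notes on version B (the rewrite author's own statement) =====
-- stated objective: idiomatic
-- what changed: Replaced A's backward index-arithmetic try/except digit loop over a mutated url variable with guard-style early returns, path-segment splitting (rsplit before the last '/'), and an rstrip-based trailing-digit extraction.
import Mathlib
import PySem

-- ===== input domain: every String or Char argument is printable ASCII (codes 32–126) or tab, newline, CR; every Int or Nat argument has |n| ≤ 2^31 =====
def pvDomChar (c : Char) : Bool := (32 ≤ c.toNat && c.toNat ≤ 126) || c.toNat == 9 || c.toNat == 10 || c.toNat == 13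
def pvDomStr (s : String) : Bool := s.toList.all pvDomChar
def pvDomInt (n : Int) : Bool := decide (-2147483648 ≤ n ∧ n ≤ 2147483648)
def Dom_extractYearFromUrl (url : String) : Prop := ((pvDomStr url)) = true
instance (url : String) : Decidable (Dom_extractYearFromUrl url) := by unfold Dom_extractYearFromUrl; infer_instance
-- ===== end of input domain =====

-- B replaces A's backward try/except digit loop with guard-style early returns, splitting off the
-- path segment before the last '/' and stripping its trailing digits (idiomatic; same cost).

-- ===== PORT A =====
-- A's for-loop over range(start, -1, -1), collecting digits backwards with break on non-digit;
-- `int(url[i])` succeeds exactly on '0'..'9' on the printable-ASCII domain = Char.isDigit.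
-- The `none` branch is unreachable (the loop is only entered at an in-range index).
def pvALoop (cs : List Char) : Nat → List Char → List Char
  | i, acc =>
    match cs[i]? with
    | none => acc
    | some c =>
      if c.isDigit then
        match i with
        | 0 => c :: acc
        | Nat.succ j => pvALoop cs j (c :: acc)
      else acc

def extractYearFromUrl (url : String) : Option String :=
  if 0 < url.length then
    let cs := url.toList
    let l := PySem.Chars.rfind cs "://".toList
    -- if l > -1: url = url[:l] (l ≥ 0 here, so the slice is take l.toNat — exact); l = url.rfind("/")
    let csl : List Char × Int :=
      if l > -1 then
        let cs' := cs.take l.toNat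
        (cs', PySem.Chars.rfind cs' ['/'])
      else (cs, l)
    let start := csl.2 - 1
    -- range(start, -1, -1) is empty iff start < 0
    let year := if 0 ≤ start then pvALoop csl.1 start.toNat [] else []
    some (String.ofList (year.take 4))
  else none

-- ===== PORT B =====
def extractYearFromUrl_alt (url : String) : Option String :=
  if url = "" then none
  else
    let cs := url.toList
    let i := PySem.Chars.rfind cs "://".toList
    if i < 0 then some ""
    else
      let s := cs.take i.toNat    -- url[:i], i ≥ 0 here: exact
      if PySem.Chars.isIn ['/'] s = false then some ""
      else
        -- s.rsplit('/', 1)[0]: the part before the last '/' ('/' ∈ s here) — exact hand port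
        let before := ((s.reverse.dropWhile (· ≠ '/')).drop 1).reverse
        -- before.rstrip('0123456789'): drop the trailing digit run — exact hand port
        let stripped := (before.reverse.dropWhile Char.isDigit).reverse
        let run := before.drop stripped.length
        some (String.ofList (run.take 4))

-- ===== PRECONDITION & SPEC =====
def Spec_extractYearFromUrl (url : String) (out : Option String) : Prop := out = extractYearFromUrl_alt url
instance (url : String) (out : Option String) : Decidable (Spec_extractYearFromUrl url out) := by unfold Spec_extractYearFromUrl; infer_instance

-- ===== CLAIM (what is proved, stated in full; the proofs are below) =====
def Claim_equal_extractYearFromUrl : Prop := ∀ (url : String), Dom_extractYearFromUrl url → Spec_extractYearFromUrl url (extractYearFromUrl url)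

-- ===== LEMMAS AND PROOFS =====

-- rfind.go s sub i returns -1 with no match at any j ≤ i, or the greatest match position p ≤ i
lemma pv_go_cases (s sub : List Char) (i : Nat) :
    (PySem.Chars.rfind.go s sub i = -1 ∧ ∀ j : Nat, j ≤ i → sub.isPrefixOf (s.drop j) = false) ∨
    (∃ p : Nat, PySem.Chars.rfind.go s sub i = (p : Int) ∧ p ≤ i ∧
      sub.isPrefixOf (s.drop p) = true ∧
      ∀ j : Nat, j ≤ i → p < j → sub.isPrefixOf (s.drop j) = false) := by
  induction i with
  | zero =>
    cases hB : sub.isPrefixOf s with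
    | false =>
      left
      refine ⟨by simp [PySem.Chars.rfind.go, hB], ?_⟩
      intro j hj
      interval_cases j
      simpa using hB
    | true =>
      right
      exact ⟨0, by simp [PySem.Chars.rfind.go, hB], le_refl 0, by simpa using hB,
        fun j hj hlt => absurd hlt (by omega)⟩
  | succ n ih =>
    cases hB : sub.isPrefixOf (s.drop (n+1)) with
    | true =>
      right
      refine ⟨n+1, by simp [PySem.Chars.rfind.go, hB], le_refl _, hB, ?_⟩
      intro j hj hgt; omega
    | false =>
      have hgo : PySem.Chars.rfind.go s sub (n+1) = PySem.Chars.rfind.go s sub n := by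
        simp [PySem.Chars.rfind.go, hB]
      rcases ih with ⟨h1, h2⟩ | ⟨p, hp, hple, hpre, hmax⟩
      · left
        refine ⟨hgo.trans h1, ?_⟩
        intro j hj
        rcases Nat.lt_or_ge j (n+1) with hlt | hge
        · exact h2 j (by omega)
        · have : j = n+1 := by omega
          subst this; exact hB
      · right
        refine ⟨p, hgo.trans hp, by omega, hpre, ?_⟩
        intro j hj hgt
        rcases Nat.lt_or_ge j (n+1) with hlt | hge
        · exact hmax j (by omega) hgt
        · have : j = n+1 := by omega
          subst this; exact hB

-- rfind for a nonempty pattern: -1 with no match anywhere, or the greatest match position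
lemma pv_rfind_cases (s sub : List Char) (hsub : sub ≠ []) :
    (PySem.Chars.rfind s sub = -1 ∧ ∀ j : Nat, sub.isPrefixOf (s.drop j) = false) ∨
    (∃ p : Nat, PySem.Chars.rfind s sub = (p : Int) ∧
      sub.isPrefixOf (s.drop p) = true ∧
      ∀ j : Nat, p < j → sub.isPrefixOf (s.drop j) = false) := by
  have hbig : ∀ j : Nat, s.length < j → sub.isPrefixOf (s.drop j) = false := by
    intro j hj
    have hnil : s.drop j = [] := List.drop_eq_nil_of_le (by omega)
    cases sub with
    | nil => exact absurd rfl hsub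
    | cons a t => simp [hnil, List.isPrefixOf]
  rcases pv_go_cases s sub s.length with ⟨h1, h2⟩ | ⟨p, hp, _, hpre, hmax⟩
  · left
    refine ⟨h1, fun j => ?_⟩
    rcases Nat.le_total j s.length with hle | hge
    · exact h2 j hle
    · rcases Nat.eq_or_lt_of_le hge with heq | hlt
      · exact h2 j (by omega)
      · exact hbig j hlt
  · right
    refine ⟨p, hp, hpre, fun j hgt => ?_⟩
    rcases Nat.le_total j s.length with hle | hge
    · exact hmax j hle hgt
    · rcases Nat.eq_or_lt_of_le hge with heq | hlt
      · exact hmax j (by omega) hgt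
      · exact hbig j hlt

-- singleton prefix at j ↔ the character at j
lemma pv_single_prefix (s : List Char) (c : Char) (j : Nat) :
    [c].isPrefixOf (s.drop j) = true ↔ s[j]? = some c := by
  have hh : (s.drop j).head? = s[j]? := by rw [List.head?_drop]
  cases hd : s.drop j with
  | nil =>
    rw [hd] at hh
    simp only [List.head?_nil] at hh
    rw [← hh]
    simp [List.isPrefixOf]
  | cons a t =>
    rw [hd] at hh
    simp only [List.head?_cons] at hh
    rw [← hh]
    simp only [List.isPrefixOf, Bool.and_true, beq_iff_eq, Option.some.injEq]
    exact eq_comm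

-- the rstrip-then-drop step computes the reversed takeWhile (the trailing digit run)
lemma pv_run_eq (bs : List Char) :
    bs.drop ((bs.reverse.dropWhile Char.isDigit).reverse).length
      = (bs.reverse.takeWhile Char.isDigit).reverse := by
  have hbs : bs = (bs.reverse.dropWhile Char.isDigit).reverse ++ (bs.reverse.takeWhile Char.isDigit).reverse := by
    rw [← List.reverse_append, List.takeWhile_append_dropWhile, List.reverse_reverse]
  nth_rewrite 2 [hbs]
  rw [List.drop_left]

-- the rsplit step: with the last '/' of s at position p, "before" is s.take p
lemma pv_before_eq (s : List Char) (p : Nat) (hp : s[p]? = some '/')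
    (hmax : ∀ j : Nat, p < j → s[j]? ≠ some '/') :
    ((s.reverse.dropWhile (· ≠ '/')).drop 1).reverse = s.take p := by
  have hplen : p < s.length := by
    by_contra hc
    push_neg at hc
    rw [List.getElem?_eq_none hc] at hp
    simp at hp
  have hpe : s[p] = '/' := by
    have := hp
    rw [List.getElem?_eq_getElem hplen] at this
    exact Option.some.inj this
  have hdecomp : s = s.take p ++ '/' :: s.drop (p+1) := by
    conv_lhs => rw [← List.take_append_drop p s]
    congr 1
    rw [List.drop_eq_getElem_cons hplen, hpe]
  have hnos : ∀ c ∈ (s.drop (p+1)).reverse, ¬ (c = '/') := by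
    intro c hc hcc
    subst hcc
    rw [List.mem_reverse] at hc
    rcases List.getElem_of_mem hc with ⟨j, hj, hje⟩
    have : s[p+1+j]? = some '/' := by
      rw [← List.getElem?_drop, List.getElem?_eq_getElem hj, hje]
    exact hmax (p+1+j) (by omega) this
  conv_lhs => rw [hdecomp]
  rw [List.reverse_append, List.reverse_cons, List.append_assoc, List.dropWhile_append]
  have h1 : ((s.drop (p+1)).reverse.dropWhile (· ≠ '/')) = [] := by
    rw [List.dropWhile_eq_nil_iff]
    intro x hx
    simpa using hnos x hx
  rw [h1]
  simp [List.dropWhile_cons]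

-- the A loop from index n equals the reversed takeWhile of the reversed prefix of length n+1
lemma pv_loop_eq (cs : List Char) (n : Nat) (hn : n < cs.length) (acc : List Char) :
    pvALoop cs n acc = ((cs.take (n+1)).reverse.takeWhile Char.isDigit).reverse ++ acc := by
  induction n generalizing acc with
  | zero =>
    have h0 : cs[0]? = some cs[0] := List.getElem?_eq_getElem hn
    rw [pvALoop, h0]
    have ht : (cs.take 1).reverse = [cs[0]] := by
      rw [List.take_succ, List.take_zero, h0]
      simp
    cases hd : (cs[0]).isDigit with
    | true => simp [hd, ht]
    | false => simp [hd, ht, List.takeWhile_cons]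
  | succ j ih =>
    have hjlen : j < cs.length := by omega
    have hj1 : cs[j+1]? = some cs[j+1] := List.getElem?_eq_getElem hn
    rw [pvALoop, hj1]
    have ht : (cs.take (j+2)).reverse = cs[j+1] :: (cs.take (j+1)).reverse := by
      rw [List.take_succ, hj1]
      simp
    cases hd : (cs[j+1]).isDigit with
    | true =>
      simp only [hd, if_pos]
      rw [ih hjlen]
      rw [ht, List.takeWhile_cons, hd]
      simp
    | false =>
      simp only [hd, Bool.false_eq_true, if_false]
      rw [ht, List.takeWhile_cons, hd]
      simp

-- membership of '/' from / to positional facts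
lemma pv_mem_of_getElem? (s : List Char) (c : Char) (j : Nat) (h : s[j]? = some c) : c ∈ s :=
  List.mem_of_getElem? h

lemma pv_infix_singleton (c : Char) (s : List Char) (h : c ∈ s) : [c] <:+: s := by
  rcases List.append_of_mem h with ⟨l1, l2, rfl⟩
  exact ⟨l1, l2, by simp⟩

-- ===== VERDICT (by name: the statement is the Claim_ definition above) =====
theorem extractYearFromUrl_spec : Claim_equal_extractYearFromUrl := by
  intro url _
  unfold Spec_extractYearFromUrl extractYearFromUrl extractYearFromUrl_alt
  by_cases hempty : url = ""
  · subst hempty; simp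
  · have hlen : 0 < url.length := by
      have h1 : url.toList ≠ [] := by simp [hempty]
      have := List.length_pos_of_ne_nil h1
      simpa using this
    rw [if_pos hlen, if_neg hempty]
    rcases pv_rfind_cases url.toList "://".toList (by decide) with ⟨hl, _⟩ | ⟨p0, hl, _, _⟩
    · -- no "://": A's loop is empty, B returns "" at the first guard
      simp only [hl]
      norm_num
    · -- "://" at p0: both work on s = url[:p0]
      have hge : ¬ ((p0 : Int) < 0) := by omega
      have hgt : (p0 : Int) > -1 := by omega
      simp only [hl]
      rw [if_pos hgt, if_neg hge]
      simp only [Int.toNat_natCast]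
      set s : List Char := url.toList.take p0 with hs
      rcases pv_rfind_cases s ['/'] (by decide) with ⟨hq, hnone⟩ | ⟨p, hq, hpre, hmaxq⟩
      · -- no '/' in s: A's loop is empty, B returns "" at the second guard
        have hmem : ¬ ('/' ∈ s) := by
          intro hm
          rcases (List.mem_iff_getElem? ).mp hm with ⟨j, hj⟩
          have := (pv_single_prefix s '/' j).mpr hj
          rw [hnone j] at this
          exact Bool.noConfusion this
        have hIn : PySem.Chars.isIn ['/'] s = false := by
          rw [PySem.Chars.isIn_eq_false_iff]
          intro hinf
          exact hmem (List.mem_of_mem_head? (by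
            rcases hinf with ⟨l1, l2, hsplit⟩
            exact absurd hsplit (by intro h; exact hmem (by rw [← h]; simp))))
        simp only [hq]
        rw [if_pos hIn]
        norm_num
      · -- last '/' of s at p
        have hp' : s[p]? = some '/' := (pv_single_prefix s '/' p).mp hpre
        have hmax' : ∀ j : Nat, p < j → s[j]? ≠ some '/' := by
          intro j hj hc
          have := (pv_single_prefix s '/' j).mpr hc
          rw [hmaxq j hj] at this
          exact Bool.noConfusion this
        have hmem : '/' ∈ s := pv_mem_of_getElem? s '/' p hp'
        have hIn : ¬ (PySem.Chars.isIn ['/'] s = false) := by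
          rw [Bool.eq_false_iff]
          intro hc
          exact absurd ((PySem.Chars.isIn_iff_infix _ _).mpr (pv_infix_singleton '/' s hmem)) hc
        simp only [hq]
        rw [if_neg hIn]
        rw [pv_before_eq s p hp' hmax', pv_run_eq]
        have hplen : p < s.length := by
          by_contra hc
          push_neg at hc
          rw [List.getElem?_eq_none hc] at hp'
          simp at hp'
        cases p with
        | zero =>
          have : ¬ ((0 : Int) ≤ (0 : Int) - 1) := by omega
          rw [if_neg (by simpa using this)]
          simp
        | succ j =>
          have hj : j < s.length := by omega
          have h0 : (0 : Int) ≤ ((j+1 : Nat) : Int) - 1 := by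
            push_cast; omega
          rw [if_pos h0]
          have htn : (((j+1 : Nat) : Int) - 1).toNat = j := by omega
          rw [htn, pv_loop_eq s j hj []]
          simp
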